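-- pv_equiv track=rewrite | github.com/ichneumonide8/AdventofCode | AdventOfCode_3_2021.py | obtain_gamma_epsilon_binary
-- ===== SOURCE A (Python) =====
-- def obtain_gamma_epsilon_binary(x):
--     """ this function allows to obtain gamma by finding the consensus sequence:
--         for each position keep the value the most represented.
--         input : a list of binary sequences
--         output : one binary sequence"""
--
--     #Initialisation :
--     gamma =[]
--     epsilon=[]
--     c={}
--     z={}
--
--
--     ## Initialiser les clés des dictionnaires
--     for elem in x:
--         compteur =0
--         for n in elem:
--             c[compteur]=0
--             z[compteur]=0
--             compteur +=1
--
--     # Compter les 1 et les 0 pour savoir lequel est le plus grand des deux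
--     for elem in x:
--         compteur=0
--         for n in elem :
--             if n == "1" :
--
--                 c[compteur] += 1
--             elif n == "0" :
--
--                 z[compteur] += 1
--             compteur +=1
--
--
--     # Comparer les valeurs de zero et de 1 pour chaque position et déterminer si c'est epsilon ou gamma
--
--     i =0
--     while i < len(c):
--         if c[i]< z[i]:
--             gamma.append(0)
--             epsilon.append(1)
--         elif c[i] > z[i]:
--             gamma.append(1)
--             epsilon.append(0)
--         i+=1
--
--     return (gamma, epsilon)
-- ===== SOURCE B (Python) =====
-- def obtain_gamma_epsilon_binary(x):
--     """Column-oriented rewrite: for each column up to the longest string, gather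
--     that column's characters and compare its '1'-count with its '0'-count."""
--     maxlen = max((len(e) for e in x), default=0)
--     gamma = []
--     epsilon = []
--     for j in range(maxlen):
--         col = [e[j] for e in x if len(e) > j]
--         ones = col.count("1")
--         zeros = col.count("0")
--         if ones > zeros:
--             gamma.append(1)
--             epsilon.append(0)
--         elif ones < zeros:
--             gamma.append(0)
--             epsilon.append(1)
--     return (gamma, epsilon)
-- ===== Notes on version B (the rewrite author's own statement) =====
-- stated objective: simpler
-- what changed: Replaces the three row-major passes over two position-keyed dicts with a single column-oriented pass: compute the max length, gather each column's characters with a guarded comprehension and compare its '1'-count with its '0'-count.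
import Mathlib
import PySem

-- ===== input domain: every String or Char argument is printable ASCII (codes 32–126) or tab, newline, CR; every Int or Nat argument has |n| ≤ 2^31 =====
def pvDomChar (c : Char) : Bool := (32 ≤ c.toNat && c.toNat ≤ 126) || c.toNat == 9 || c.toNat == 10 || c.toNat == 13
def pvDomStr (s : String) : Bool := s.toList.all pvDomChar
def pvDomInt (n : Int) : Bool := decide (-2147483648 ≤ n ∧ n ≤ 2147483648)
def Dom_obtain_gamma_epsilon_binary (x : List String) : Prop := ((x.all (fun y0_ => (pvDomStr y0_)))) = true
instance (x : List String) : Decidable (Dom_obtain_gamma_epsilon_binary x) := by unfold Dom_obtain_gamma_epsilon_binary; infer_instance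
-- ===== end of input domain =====

-- B replaces A's three row-major passes over two position-keyed dicts with one column-oriented pass (objective: simpler).

-- ===== PORT A =====
-- Literal port of A.  `c[compteur] += 1` is `Dict.modify compteur 0 (· + 1)`; the key was initialised by the
-- first loop (every counter value is below the string's length, hence below max key), so the default 0 is never
-- consulted and Python raises no KeyError — likewise `c[i]`/`z[i]` in the final loop are read with getD 0 on
-- keys the first loop created.  The `while i < len(c): … i += 1` loop is folded over range(len(c)).
def obtain_gamma_epsilon_binary (x : List String) : List Int × List Int :=
  let cz0 : PySem.Dict Int Int × PySem.Dict Int Int :=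
    x.foldl (fun cz elem =>
      let s := elem.toList.foldl
        (fun (s : PySem.Dict Int Int × PySem.Dict Int Int × Int) _n =>
          (s.1.insert s.2.2 0, s.2.1.insert s.2.2 0, s.2.2 + 1))
        (cz.1, cz.2, 0)
      (s.1, s.2.1))
    (PySem.Dict.empty, PySem.Dict.empty)
  let cz1 : PySem.Dict Int Int × PySem.Dict Int Int :=
    x.foldl (fun cz elem =>
      let s := elem.toList.foldl
        (fun (s : PySem.Dict Int Int × PySem.Dict Int Int × Int) n =>
          (if n = '1' then s.1.modify s.2.2 0 (· + 1) else s.1,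
           if n = '0' then s.2.1.modify s.2.2 0 (· + 1) else s.2.1,
           s.2.2 + 1))
        (cz.1, cz.2, 0)
      (s.1, s.2.1))
    cz0
  (PySem.List.pyRange 0 ((cz1.1.size : Nat) : Int) 1).foldl
    (fun ge i =>
      if cz1.1.getD i 0 < cz1.2.getD i 0 then (ge.1 ++ [0], ge.2 ++ [1])
      else if cz1.1.getD i 0 > cz1.2.getD i 0 then (ge.1 ++ [1], ge.2 ++ [0])
      else ge)
    ([], [])

-- ===== PORT B =====
-- Literal port of Source B: max(..., default=0) is PySem.List.maxD; the guarded comprehension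
-- `[e[j] for e in x if len(e) > j]` is a filterMap (pyGet? is some exactly when the guard holds).
def obtain_gamma_epsilon_binary_alt (x : List String) : List Int × List Int :=
  let maxlen := PySem.List.maxD (x.map (fun e => PySem.Str.len e)) (fun v => v) 0
  (PySem.List.pyRange 0 maxlen 1).foldl
    (fun ge j =>
      let col := x.filterMap (fun e =>
        if PySem.Str.len e > j then PySem.Str.pyGet? e j else none)
      let ones : Int := (col.count '1' : Int)
      let zeros : Int := (col.count '0' : Int)
      if ones > zeros then (ge.1 ++ [1], ge.2 ++ [0])
      else if ones < zeros then (ge.1 ++ [0], ge.2 ++ [1])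
      else ge)
    ([], [])

-- ===== PRECONDITION & SPEC =====
def Spec_obtain_gamma_epsilon_binary (x : List String) (out : List Int × List Int) : Prop := out = obtain_gamma_epsilon_binary_alt x
instance (x : List String) (out : List Int × List Int) : Decidable (Spec_obtain_gamma_epsilon_binary x out) := by unfold Spec_obtain_gamma_epsilon_binary; infer_instance

-- ===== CLAIM (what is proved, stated in full; the proofs are below) =====
def Claim_equal_obtain_gamma_epsilon_binary : Prop := ∀ (x : List String), Dom_obtain_gamma_epsilon_binary x → Spec_obtain_gamma_epsilon_binary x (obtain_gamma_epsilon_binary x)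

-- ===== LEMMAS AND PROOFS =====

-- the all-zero dict {0: 0, 1: 0, …, m-1: 0} that A's first loop builds
def pvZd (m : Nat) : PySem.Dict Int Int := ⟨(List.range m).map (fun n : Nat => ((n : Int), (0 : Int)))⟩

-- maximum string length (the number of keys A's first loop creates)
def pvMx (x : List String) : Nat := x.foldl (fun m e => max m e.toList.length) 0

-- contribution of one string (positions counted from k) to column j's count of character t
def pvHit (cs : List Char) (k j : Int) (t : Char) : Int :=
  match cs with
  | [] => 0
  | ch :: rest => (if j = k ∧ ch = t then 1 else 0) + pvHit rest (k + 1) j t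

theorem pvZd_keys (m : Nat) : (pvZd m).keys = (List.range m).map (fun n : Nat => (n : Int)) := by
  simp [pvZd, PySem.Dict.keys_mk, List.map_map, Function.comp]

theorem pvZd_mem_keys (m : Nat) (i : Int) : i ∈ (pvZd m).keys ↔ 0 ≤ i ∧ i < (m : Int) := by
  rw [pvZd_keys]
  constructor
  · intro hi
    obtain ⟨a, ha, rfl⟩ := List.mem_map.mp hi
    have := List.mem_range.mp ha
    omega
  · intro hi
    exact List.mem_map.mpr ⟨i.toNat, List.mem_range.mpr (by omega), by omega⟩

theorem pvZd_contains (m : Nat) (i : Int) :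
    (pvZd m).contains i = decide (0 ≤ i ∧ i < (m : Int)) := by
  rw [PySem.Dict.contains_eq_decide_mem_keys, decide_eq_decide]
  exact pvZd_mem_keys m i

theorem pvZd_nodup (m : Nat) : (pvZd m).keys.Nodup := by
  rw [pvZd_keys]
  exact (List.nodup_range).map (fun a b hab => by exact_mod_cast hab)

theorem pvZd_getD (m : Nat) (j : Int) : (pvZd m).getD j 0 = 0 := by
  by_cases h : 0 ≤ j ∧ j < (m : Int)
  · have hmem : (j, (0 : Int)) ∈ (pvZd m).items := by
      simp only [pvZd, List.mem_map]
      exact ⟨j.toNat, List.mem_range.mpr (by omega), by simp [Int.toNat_of_nonneg h.1]⟩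
    exact PySem.Dict.getD_of_mem_items _ hmem (pvZd_nodup m) 0
  · have hc : (pvZd m).contains j = false := by
      rw [pvZd_contains, decide_eq_false_iff_not]; exact h
    exact PySem.Dict.getD_of_not_contains _ _ hc

theorem pvZd_insert (m k : Nat) (h : k ≤ m) :
    (pvZd m).insert (k : Int) 0 = pvZd (max m (k + 1)) := by
  rcases Nat.lt_or_ge k m with hk | hk
  · have hc : (pvZd m).contains (k : Int) = true := by
      rw [pvZd_contains, decide_eq_true_eq]; omega
    apply PySem.Dict.ext
    rw [PySem.Dict.items_insert_of_contains _ _ hc, show max m (k + 1) = m by omega]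
    simp only [pvZd, List.map_map]
    apply List.map_congr_left
    intro i _
    simp only [Function.comp_apply, beq_iff_eq, Nat.cast_inj]
    by_cases hik : i = k
    · subst hik; simp
    · simp [hik]
  · have hkm : k = m := by omega
    subst hkm
    have hc : (pvZd k).contains (k : Int) = false := by
      rw [pvZd_contains, decide_eq_false_iff_not]; omega
    apply PySem.Dict.ext
    rw [PySem.Dict.items_insert_of_not_contains _ _ hc, show max k (k + 1) = k + 1 by omega]
    simp [pvZd, List.range_succ]

theorem pvLoop1_inner (cs : List Char) : ∀ (k m : Nat), k ≤ m →
    cs.foldl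
      (fun (s : PySem.Dict Int Int × PySem.Dict Int Int × Int) _n =>
          (s.1.insert s.2.2 0, s.2.1.insert s.2.2 0, s.2.2 + 1))
      (pvZd m, pvZd m, (k : Int)) =
    (pvZd (max m (k + cs.length)), pvZd (max m (k + cs.length)), ((k + cs.length : Nat) : Int)) := by
  induction cs with
  | nil =>
    intro k m h
    simp only [List.foldl_nil, List.length_nil, Nat.add_zero]
    rw [show max m k = m by omega]
  | cons ch rest ih =>
    intro k m h
    simp only [List.foldl_cons]
    rw [show ((pvZd m, pvZd m, (k : Int)).1.insert (pvZd m, pvZd m, (k : Int)).2.2 0,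
          (pvZd m, pvZd m, (k : Int)).2.1.insert (pvZd m, pvZd m, (k : Int)).2.2 0,
          (pvZd m, pvZd m, (k : Int)).2.2 + 1) =
        (pvZd (max m (k + 1)), pvZd (max m (k + 1)), ((k + 1 : Nat) : Int)) by
      simp [pvZd_insert m k h]]
    rw [ih (k + 1) (max m (k + 1)) (by omega)]
    have hm : max (max m (k + 1)) (k + 1 + rest.length) = max m (k + (ch :: rest).length) := by
      rw [List.length_cons]; omega
    have hn : (k + 1) + rest.length = k + (ch :: rest).length := by
      rw [List.length_cons]; omega
    rw [hm, hn]

theorem pvLoop1 (x : List String) : ∀ (m : Nat),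
    x.foldl (fun (cz : PySem.Dict Int Int × PySem.Dict Int Int) elem =>
      ((elem.toList.foldl
        (fun (s : PySem.Dict Int Int × PySem.Dict Int Int × Int) _n =>
          (s.1.insert s.2.2 0, s.2.1.insert s.2.2 0, s.2.2 + 1))
        (cz.1, cz.2, 0)).1,
       (elem.toList.foldl
        (fun (s : PySem.Dict Int Int × PySem.Dict Int Int × Int) _n =>
          (s.1.insert s.2.2 0, s.2.1.insert s.2.2 0, s.2.2 + 1))
        (cz.1, cz.2, 0)).2.1)) (pvZd m, pvZd m) =
    (pvZd (x.foldl (fun m e => max m e.toList.length) m),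
     pvZd (x.foldl (fun m e => max m e.toList.length) m)) := by
  induction x with
  | nil => intro m; simp
  | cons e rest ih =>
    intro m
    simp only [List.foldl_cons]
    have h0 : ((pvZd m, pvZd m).1, (pvZd m, pvZd m).2, (0 : Int)) = (pvZd m, pvZd m, ((0 : Nat) : Int)) := by
      norm_num
    rw [h0, pvLoop1_inner e.toList 0 m (Nat.zero_le m)]
    rw [show (0 + e.toList.length) = e.toList.length by omega]
    exact ih (max m e.toList.length)

theorem pvLoop2_inner (cs : List Char) : ∀ (k : Int) (c z : PySem.Dict Int Int),
    (∀ i : Int, k ≤ i → i < k + cs.length → c.contains i = true ∧ z.contains i = true) →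
    (cs.foldl
      (fun (s : PySem.Dict Int Int × PySem.Dict Int Int × Int) n =>
          (if n = '1' then s.1.modify s.2.2 0 (· + 1) else s.1,
           if n = '0' then s.2.1.modify s.2.2 0 (· + 1) else s.2.1,
           s.2.2 + 1)) (c, z, k)).1.keys = c.keys ∧
    (cs.foldl
      (fun (s : PySem.Dict Int Int × PySem.Dict Int Int × Int) n =>
          (if n = '1' then s.1.modify s.2.2 0 (· + 1) else s.1,
           if n = '0' then s.2.1.modify s.2.2 0 (· + 1) else s.2.1,
           s.2.2 + 1)) (c, z, k)).2.1.keys = z.keys ∧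
    (∀ j : Int, (cs.foldl
      (fun (s : PySem.Dict Int Int × PySem.Dict Int Int × Int) n =>
          (if n = '1' then s.1.modify s.2.2 0 (· + 1) else s.1,
           if n = '0' then s.2.1.modify s.2.2 0 (· + 1) else s.2.1,
           s.2.2 + 1)) (c, z, k)).1.getD j 0 = c.getD j 0 + pvHit cs k j '1') ∧
    (∀ j : Int, (cs.foldl
      (fun (s : PySem.Dict Int Int × PySem.Dict Int Int × Int) n =>
          (if n = '1' then s.1.modify s.2.2 0 (· + 1) else s.1,
           if n = '0' then s.2.1.modify s.2.2 0 (· + 1) else s.2.1,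
           s.2.2 + 1)) (c, z, k)).2.1.getD j 0 = z.getD j 0 + pvHit cs k j '0') := by
  induction cs with
  | nil => intro k c z _; simp [pvHit]
  | cons ch rest ih =>
    intro k c z hc
    have hck := hc k le_rfl (by rw [List.length_cons]; push_cast; omega)
    simp only [List.foldl_cons]
    show _ ∧ _ ∧ _ ∧ _
    have hkeysC : (if ch = '1' then c.modify k 0 (· + 1) else c).keys = c.keys := by
      split_ifs with h
      · rw [PySem.Dict.keys_modify, PySem.Dict.keys_insert_of_contains _ _ hck.1]
      · rfl
    have hkeysZ : (if ch = '0' then z.modify k 0 (· + 1) else z).keys = z.keys := by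
      split_ifs with h
      · rw [PySem.Dict.keys_modify, PySem.Dict.keys_insert_of_contains _ _ hck.2]
      · rfl
    have hcontC : ∀ i : Int, (if ch = '1' then c.modify k 0 (· + 1) else c).contains i = c.contains i := by
      intro i
      rw [PySem.Dict.contains_eq_decide_mem_keys, PySem.Dict.contains_eq_decide_mem_keys, hkeysC]
    have hcontZ : ∀ i : Int, (if ch = '0' then z.modify k 0 (· + 1) else z).contains i = z.contains i := by
      intro i
      rw [PySem.Dict.contains_eq_decide_mem_keys, PySem.Dict.contains_eq_decide_mem_keys, hkeysZ]
    have hgetC : ∀ j : Int, (if ch = '1' then c.modify k 0 (· + 1) else c).getD j 0 =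
        c.getD j 0 + (if j = k ∧ ch = '1' then 1 else 0) := by
      intro j
      by_cases h1 : ch = '1'
      · simp only [h1, if_true]
        rw [PySem.Dict.getD_modify]
        by_cases hjk : j = k
        · subst hjk; simp
        · simp [hjk]
      · simp [h1]
    have hgetZ : ∀ j : Int, (if ch = '0' then z.modify k 0 (· + 1) else z).getD j 0 =
        z.getD j 0 + (if j = k ∧ ch = '0' then 1 else 0) := by
      intro j
      by_cases h1 : ch = '0'
      · simp only [h1, if_true]
        rw [PySem.Dict.getD_modify]
        by_cases hjk : j = k
        · subst hjk; simp
        · simp [hjk]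
      · simp [h1]
    obtain ⟨h1, h2, h3, h4⟩ := ih (k + 1)
      (if ch = '1' then c.modify k 0 (· + 1) else c)
      (if ch = '0' then z.modify k 0 (· + 1) else z)
      (by
        intro i hi1 hi2
        rw [hcontC, hcontZ]
        exact hc i (by omega) (by rw [List.length_cons] at *; push_cast at *; omega))
    refine ⟨h1.trans hkeysC, h2.trans hkeysZ, ?_, ?_⟩
    · intro j
      rw [h3 j, hgetC j]
      show _ = c.getD j 0 + pvHit (ch :: rest) k j '1'
      rw [pvHit]
      ring
    · intro j
      rw [h4 j, hgetZ j]
      show _ = z.getD j 0 + pvHit (ch :: rest) k j '0'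
      rw [pvHit]
      ring

theorem pvLoop2 (x : List String) : ∀ (c z : PySem.Dict Int Int),
    (∀ e ∈ x, ∀ i : Int, 0 ≤ i → i < e.toList.length → c.contains i = true ∧ z.contains i = true) →
    (x.foldl (fun (cz : PySem.Dict Int Int × PySem.Dict Int Int) elem =>
      ((elem.toList.foldl
        (fun (s : PySem.Dict Int Int × PySem.Dict Int Int × Int) n =>
          (if n = '1' then s.1.modify s.2.2 0 (· + 1) else s.1,
           if n = '0' then s.2.1.modify s.2.2 0 (· + 1) else s.2.1,
           s.2.2 + 1))
        (cz.1, cz.2, 0)).1,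
       (elem.toList.foldl
        (fun (s : PySem.Dict Int Int × PySem.Dict Int Int × Int) n =>
          (if n = '1' then s.1.modify s.2.2 0 (· + 1) else s.1,
           if n = '0' then s.2.1.modify s.2.2 0 (· + 1) else s.2.1,
           s.2.2 + 1))
        (cz.1, cz.2, 0)).2.1)) (c, z)).1.keys = c.keys ∧
    (x.foldl (fun (cz : PySem.Dict Int Int × PySem.Dict Int Int) elem =>
      ((elem.toList.foldl
        (fun (s : PySem.Dict Int Int × PySem.Dict Int Int × Int) n =>
          (if n = '1' then s.1.modify s.2.2 0 (· + 1) else s.1,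
           if n = '0' then s.2.1.modify s.2.2 0 (· + 1) else s.2.1,
           s.2.2 + 1))
        (cz.1, cz.2, 0)).1,
       (elem.toList.foldl
        (fun (s : PySem.Dict Int Int × PySem.Dict Int Int × Int) n =>
          (if n = '1' then s.1.modify s.2.2 0 (· + 1) else s.1,
           if n = '0' then s.2.1.modify s.2.2 0 (· + 1) else s.2.1,
           s.2.2 + 1))
        (cz.1, cz.2, 0)).2.1)) (c, z)).2.keys = z.keys ∧
    (∀ j : Int, (x.foldl (fun (cz : PySem.Dict Int Int × PySem.Dict Int Int) elem =>
      ((elem.toList.foldl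
        (fun (s : PySem.Dict Int Int × PySem.Dict Int Int × Int) n =>
          (if n = '1' then s.1.modify s.2.2 0 (· + 1) else s.1,
           if n = '0' then s.2.1.modify s.2.2 0 (· + 1) else s.2.1,
           s.2.2 + 1))
        (cz.1, cz.2, 0)).1,
       (elem.toList.foldl
        (fun (s : PySem.Dict Int Int × PySem.Dict Int Int × Int) n =>
          (if n = '1' then s.1.modify s.2.2 0 (· + 1) else s.1,
           if n = '0' then s.2.1.modify s.2.2 0 (· + 1) else s.2.1,
           s.2.2 + 1))
        (cz.1, cz.2, 0)).2.1)) (c, z)).1.getD j 0 = c.getD j 0 + (x.map (fun e => pvHit e.toList 0 j '1')).sum) ∧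
    (∀ j : Int, (x.foldl (fun (cz : PySem.Dict Int Int × PySem.Dict Int Int) elem =>
      ((elem.toList.foldl
        (fun (s : PySem.Dict Int Int × PySem.Dict Int Int × Int) n =>
          (if n = '1' then s.1.modify s.2.2 0 (· + 1) else s.1,
           if n = '0' then s.2.1.modify s.2.2 0 (· + 1) else s.2.1,
           s.2.2 + 1))
        (cz.1, cz.2, 0)).1,
       (elem.toList.foldl
        (fun (s : PySem.Dict Int Int × PySem.Dict Int Int × Int) n =>
          (if n = '1' then s.1.modify s.2.2 0 (· + 1) else s.1,
           if n = '0' then s.2.1.modify s.2.2 0 (· + 1) else s.2.1,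
           s.2.2 + 1))
        (cz.1, cz.2, 0)).2.1)) (c, z)).2.getD j 0 = z.getD j 0 + (x.map (fun e => pvHit e.toList 0 j '0')).sum) := by
  induction x with
  | nil => intro c z _; simp
  | cons e rest ih =>
    intro c z hc
    simp only [List.foldl_cons]
    obtain ⟨k1, k2, g1, g2⟩ := pvLoop2_inner e.toList 0 c z
      (by
        intro i hi1 hi2
        exact hc e List.mem_cons_self i hi1 (by push_cast at *; omega))
    obtain ⟨K1, K2, G1, G2⟩ :=
      ih (e.toList.foldl
            (fun (s : PySem.Dict Int Int × PySem.Dict Int Int × Int) n =>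
          (if n = '1' then s.1.modify s.2.2 0 (· + 1) else s.1,
           if n = '0' then s.2.1.modify s.2.2 0 (· + 1) else s.2.1,
           s.2.2 + 1)) (c, z, 0)).1
         (e.toList.foldl
            (fun (s : PySem.Dict Int Int × PySem.Dict Int Int × Int) n =>
          (if n = '1' then s.1.modify s.2.2 0 (· + 1) else s.1,
           if n = '0' then s.2.1.modify s.2.2 0 (· + 1) else s.2.1,
           s.2.2 + 1)) (c, z, 0)).2.1
         (by
           intro e' he' i hi1 hi2
           constructor
           · rw [PySem.Dict.contains_eq_decide_mem_keys, k1, ← PySem.Dict.contains_eq_decide_mem_keys]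
             exact (hc e' (List.mem_cons_of_mem _ he') i hi1 hi2).1
           · rw [PySem.Dict.contains_eq_decide_mem_keys, k2, ← PySem.Dict.contains_eq_decide_mem_keys]
             exact (hc e' (List.mem_cons_of_mem _ he') i hi1 hi2).2)
    refine ⟨K1.trans k1, K2.trans k2, fun j => ?_, fun j => ?_⟩
    · have h := G1 j
      rw [g1 j] at h
      simp only [List.map_cons, List.sum_cons]
      exact h.trans (by ring)
    · have h := G2 j
      rw [g2 j] at h
      simp only [List.map_cons, List.sum_cons]
      exact h.trans (by ring)

theorem pvHit_eq (cs : List Char) : ∀ (k j : Int) (t : Char),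
    pvHit cs k j t =
      if k ≤ j ∧ j < k + cs.length ∧ cs.getD (j - k).toNat ' ' = t then 1 else 0 := by
  induction cs with
  | nil =>
    intro k j t
    rw [pvHit, if_neg]
    rintro ⟨h1, h2, -⟩
    rw [List.length_nil] at h2
    omega
  | cons ch rest ih =>
    intro k j t
    rw [pvHit, ih (k + 1) j t]
    rcases eq_or_ne j k with hjk | hjk
    · rw [hjk]
      have hA : (k = k ∧ ch = t) ↔ (ch = t) := by
        constructor
        · exact fun h => h.2
        · exact fun h => ⟨rfl, h⟩
      have hB : ¬(k + 1 ≤ k ∧ k < k + 1 + (rest.length : Int) ∧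
          rest.getD (k - (k + 1)).toNat ' ' = t) := by rintro ⟨h, -, -⟩; omega
      have hC : (k ≤ k ∧ k < k + ((ch :: rest).length : Int) ∧
          (ch :: rest).getD (k - k).toNat ' ' = t) ↔ (ch = t) := by
        constructor
        · rintro ⟨-, -, h⟩; simpa using h
        · intro h
          refine ⟨le_refl _, by rw [List.length_cons]; push_cast; omega, by simpa using h⟩
      rw [if_congr hA rfl rfl, if_neg hB, if_congr hC rfl rfl, add_zero]
    · have hA : ¬(j = k ∧ ch = t) := fun h => hjk h.1
      rw [if_neg hA, zero_add]
      by_cases hk1 : k + 1 ≤ j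
      · have ht : (j - k).toNat = (j - (k + 1)).toNat + 1 := by omega
        rw [ht, List.getD_cons_succ]
        refine if_congr ?_ rfl rfl
        rw [List.length_cons]
        push_cast
        constructor
        · rintro ⟨h1, h2, h3⟩; exact ⟨by omega, by omega, h3⟩
        · rintro ⟨h1, h2, h3⟩; exact ⟨by omega, by omega, h3⟩
      · have hB : ¬(k + 1 ≤ j ∧ j < k + 1 + (rest.length : Int) ∧
            rest.getD (j - (k + 1)).toNat ' ' = t) := by rintro ⟨h, -, -⟩; omega
        have hC : ¬(k ≤ j ∧ j < k + ((ch :: rest).length : Int) ∧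
            (ch :: rest).getD (j - k).toNat ' ' = t) := by rintro ⟨h1, -, -⟩; omega
        rw [if_neg hB, if_neg hC]

theorem pvGet_some (cs : List Char) (j : Int) (h0 : 0 ≤ j) (h1 : j < (cs.length : Int)) :
    PySem.List.pyGet? cs j = some (cs.getD j.toNat ' ') := by
  conv_lhs => rw [show j = ((j.toNat : Nat) : Int) by omega]
  rw [PySem.List.pyGet?_natCast, List.getElem?_eq_getElem (by omega),
    List.getD_eq_getElem cs ' ' (by omega)]

theorem pvCol_count (x : List String) (j : Int) (h0 : 0 ≤ j) (t : Char) :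
    ((x.filterMap (fun e =>
        if PySem.Str.len e > j then PySem.Str.pyGet? e j else none)).count t : Int) =
      (x.map (fun e => pvHit e.toList 0 j t)).sum := by
  induction x with
  | nil => simp
  | cons e rest ih =>
    rw [List.filterMap_cons, List.map_cons, List.sum_cons]
    by_cases hg : PySem.Str.len e > j
    · rw [if_pos hg]
      rw [PySem.Str.len_eq] at hg
      have hget : PySem.Str.pyGet? e j = some (e.toList.getD j.toNat ' ') := by
        rw [show PySem.Str.pyGet? e j = PySem.List.pyGet? e.toList j from rfl]
        exact pvGet_some e.toList j h0 hg
      rw [hget, pvHit_eq e.toList 0 j t]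
      by_cases he : e.toList.getD j.toNat ' ' = t
      · have hcond : (0 ≤ j ∧ j < 0 + (e.toList.length : Int) ∧
            e.toList.getD (j - 0).toNat ' ' = t) := ⟨h0, by omega, by rw [sub_zero]; exact he⟩
        rw [if_pos hcond]
        simp only [he, List.count_cons, beq_self_eq_true, if_true]
        push_cast
        rw [ih]
        ring
      · have hcond : ¬(0 ≤ j ∧ j < 0 + (e.toList.length : Int) ∧
            e.toList.getD (j - 0).toNat ' ' = t) := by
          rintro ⟨-, -, hx⟩; rw [sub_zero] at hx; exact he hx
        rw [if_neg hcond]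
        dsimp only
        have hbeq : ¬((e.toList.getD j.toNat ' ' == t) = true) := by simpa using he
        rw [List.count_cons, if_neg hbeq, Nat.add_zero, ih]
        ring
    · rw [if_neg hg]
      rw [PySem.Str.len_eq] at hg
      rw [pvHit_eq e.toList 0 j t, if_neg (by rintro ⟨-, h, -⟩; omega)]
      rw [ih]
      ring

theorem pvLen_le_pvMx (x : List String) (e : String) (he : e ∈ x) : e.toList.length ≤ pvMx x :=
  (PySem.List.le_foldl_max_nat x (fun e => e.toList.length) 0).2 e he

theorem pvCastFold (l : List String) : ∀ (a : Nat),
    (l.map (fun e => PySem.Str.len e)).foldl max ((a : Nat) : Int) =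
      ((l.foldl (fun m e => max m e.toList.length) a : Nat) : Int) := by
  induction l with
  | nil => intro a; simp
  | cons e rest ih =>
    intro a
    simp only [List.map_cons, List.foldl_cons, PySem.Str.len_eq]
    rw [← Nat.cast_max]
    exact ih (max a e.toList.length)

theorem pvMaxD_eq (x : List String) :
    PySem.List.maxD (x.map (fun e => PySem.Str.len e)) (fun v => v) 0 = (pvMx x : Int) := by
  cases x with
  | nil => rfl
  | cons e rest =>
    rw [List.map_cons]
    simp only [PySem.List.maxD]
    rw [PySem.List.max?_id_cons, Option.getD_some, PySem.Str.len_eq, pvCastFold rest e.toList.length,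
      show pvMx (e :: rest) = rest.foldl (fun m e => max m e.toList.length) e.toList.length by
        simp [pvMx]]

theorem pvSizeKeys (d : PySem.Dict Int Int) : d.size = d.keys.length := by
  simp [PySem.Dict.size, PySem.Dict.keys]

-- the common column-wise normal form both ports are reduced to
def pvCanon (x : List String) : List Int × List Int :=
  (PySem.List.pyRange 0 ((pvMx x : Nat) : Int) 1).foldl
    (fun ge j =>
      if (x.map (fun e => pvHit e.toList 0 j '1')).sum > (x.map (fun e => pvHit e.toList 0 j '0')).sum then (ge.1 ++ [1], ge.2 ++ [0])
      else if (x.map (fun e => pvHit e.toList 0 j '1')).sum < (x.map (fun e => pvHit e.toList 0 j '0')).sum then (ge.1 ++ [0], ge.2 ++ [1])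
      else ge)
    ([], [])

-- let-free expansion of port A (definitionally equal; used only by the proofs)
def pvAexp (x : List String) : List Int × List Int :=
  (PySem.List.pyRange 0 (((x.foldl (fun (cz : PySem.Dict Int Int × PySem.Dict Int Int) elem =>
      ((elem.toList.foldl
        (fun (s : PySem.Dict Int Int × PySem.Dict Int Int × Int) n =>
          (if n = '1' then s.1.modify s.2.2 0 (· + 1) else s.1,
           if n = '0' then s.2.1.modify s.2.2 0 (· + 1) else s.2.1,
           s.2.2 + 1))
        (cz.1, cz.2, 0)).1,
       (elem.toList.foldl
        (fun (s : PySem.Dict Int Int × PySem.Dict Int Int × Int) n =>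
          (if n = '1' then s.1.modify s.2.2 0 (· + 1) else s.1,
           if n = '0' then s.2.1.modify s.2.2 0 (· + 1) else s.2.1,
           s.2.2 + 1))
        (cz.1, cz.2, 0)).2.1)) (x.foldl (fun (cz : PySem.Dict Int Int × PySem.Dict Int Int) elem =>
      ((elem.toList.foldl
        (fun (s : PySem.Dict Int Int × PySem.Dict Int Int × Int) _n =>
          (s.1.insert s.2.2 0, s.2.1.insert s.2.2 0, s.2.2 + 1))
        (cz.1, cz.2, 0)).1,
       (elem.toList.foldl
        (fun (s : PySem.Dict Int Int × PySem.Dict Int Int × Int) _n =>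
          (s.1.insert s.2.2 0, s.2.1.insert s.2.2 0, s.2.2 + 1))
        (cz.1, cz.2, 0)).2.1)) (PySem.Dict.empty, PySem.Dict.empty))).1.size : Nat) : Int) 1).foldl
    (fun ge i =>
      if (x.foldl (fun (cz : PySem.Dict Int Int × PySem.Dict Int Int) elem =>
      ((elem.toList.foldl
        (fun (s : PySem.Dict Int Int × PySem.Dict Int Int × Int) n =>
          (if n = '1' then s.1.modify s.2.2 0 (· + 1) else s.1,
           if n = '0' then s.2.1.modify s.2.2 0 (· + 1) else s.2.1,
           s.2.2 + 1))
        (cz.1, cz.2, 0)).1,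
       (elem.toList.foldl
        (fun (s : PySem.Dict Int Int × PySem.Dict Int Int × Int) n =>
          (if n = '1' then s.1.modify s.2.2 0 (· + 1) else s.1,
           if n = '0' then s.2.1.modify s.2.2 0 (· + 1) else s.2.1,
           s.2.2 + 1))
        (cz.1, cz.2, 0)).2.1)) (x.foldl (fun (cz : PySem.Dict Int Int × PySem.Dict Int Int) elem =>
      ((elem.toList.foldl
        (fun (s : PySem.Dict Int Int × PySem.Dict Int Int × Int) _n =>
          (s.1.insert s.2.2 0, s.2.1.insert s.2.2 0, s.2.2 + 1))
        (cz.1, cz.2, 0)).1,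
       (elem.toList.foldl
        (fun (s : PySem.Dict Int Int × PySem.Dict Int Int × Int) _n =>
          (s.1.insert s.2.2 0, s.2.1.insert s.2.2 0, s.2.2 + 1))
        (cz.1, cz.2, 0)).2.1)) (PySem.Dict.empty, PySem.Dict.empty))).1.getD i 0 < (x.foldl (fun (cz : PySem.Dict Int Int × PySem.Dict Int Int) elem =>
      ((elem.toList.foldl
        (fun (s : PySem.Dict Int Int × PySem.Dict Int Int × Int) n =>
          (if n = '1' then s.1.modify s.2.2 0 (· + 1) else s.1,
           if n = '0' then s.2.1.modify s.2.2 0 (· + 1) else s.2.1,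
           s.2.2 + 1))
        (cz.1, cz.2, 0)).1,
       (elem.toList.foldl
        (fun (s : PySem.Dict Int Int × PySem.Dict Int Int × Int) n =>
          (if n = '1' then s.1.modify s.2.2 0 (· + 1) else s.1,
           if n = '0' then s.2.1.modify s.2.2 0 (· + 1) else s.2.1,
           s.2.2 + 1))
        (cz.1, cz.2, 0)).2.1)) (x.foldl (fun (cz : PySem.Dict Int Int × PySem.Dict Int Int) elem =>
      ((elem.toList.foldl
        (fun (s : PySem.Dict Int Int × PySem.Dict Int Int × Int) _n =>
          (s.1.insert s.2.2 0, s.2.1.insert s.2.2 0, s.2.2 + 1))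
        (cz.1, cz.2, 0)).1,
       (elem.toList.foldl
        (fun (s : PySem.Dict Int Int × PySem.Dict Int Int × Int) _n =>
          (s.1.insert s.2.2 0, s.2.1.insert s.2.2 0, s.2.2 + 1))
        (cz.1, cz.2, 0)).2.1)) (PySem.Dict.empty, PySem.Dict.empty))).2.getD i 0 then (ge.1 ++ [0], ge.2 ++ [1])
      else if (x.foldl (fun (cz : PySem.Dict Int Int × PySem.Dict Int Int) elem =>
      ((elem.toList.foldl
        (fun (s : PySem.Dict Int Int × PySem.Dict Int Int × Int) n =>
          (if n = '1' then s.1.modify s.2.2 0 (· + 1) else s.1,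
           if n = '0' then s.2.1.modify s.2.2 0 (· + 1) else s.2.1,
           s.2.2 + 1))
        (cz.1, cz.2, 0)).1,
       (elem.toList.foldl
        (fun (s : PySem.Dict Int Int × PySem.Dict Int Int × Int) n =>
          (if n = '1' then s.1.modify s.2.2 0 (· + 1) else s.1,
           if n = '0' then s.2.1.modify s.2.2 0 (· + 1) else s.2.1,
           s.2.2 + 1))
        (cz.1, cz.2, 0)).2.1)) (x.foldl (fun (cz : PySem.Dict Int Int × PySem.Dict Int Int) elem =>
      ((elem.toList.foldl
        (fun (s : PySem.Dict Int Int × PySem.Dict Int Int × Int) _n =>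
          (s.1.insert s.2.2 0, s.2.1.insert s.2.2 0, s.2.2 + 1))
        (cz.1, cz.2, 0)).1,
       (elem.toList.foldl
        (fun (s : PySem.Dict Int Int × PySem.Dict Int Int × Int) _n =>
          (s.1.insert s.2.2 0, s.2.1.insert s.2.2 0, s.2.2 + 1))
        (cz.1, cz.2, 0)).2.1)) (PySem.Dict.empty, PySem.Dict.empty))).1.getD i 0 > (x.foldl (fun (cz : PySem.Dict Int Int × PySem.Dict Int Int) elem =>
      ((elem.toList.foldl
        (fun (s : PySem.Dict Int Int × PySem.Dict Int Int × Int) n =>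
          (if n = '1' then s.1.modify s.2.2 0 (· + 1) else s.1,
           if n = '0' then s.2.1.modify s.2.2 0 (· + 1) else s.2.1,
           s.2.2 + 1))
        (cz.1, cz.2, 0)).1,
       (elem.toList.foldl
        (fun (s : PySem.Dict Int Int × PySem.Dict Int Int × Int) n =>
          (if n = '1' then s.1.modify s.2.2 0 (· + 1) else s.1,
           if n = '0' then s.2.1.modify s.2.2 0 (· + 1) else s.2.1,
           s.2.2 + 1))
        (cz.1, cz.2, 0)).2.1)) (x.foldl (fun (cz : PySem.Dict Int Int × PySem.Dict Int Int) elem =>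
      ((elem.toList.foldl
        (fun (s : PySem.Dict Int Int × PySem.Dict Int Int × Int) _n =>
          (s.1.insert s.2.2 0, s.2.1.insert s.2.2 0, s.2.2 + 1))
        (cz.1, cz.2, 0)).1,
       (elem.toList.foldl
        (fun (s : PySem.Dict Int Int × PySem.Dict Int Int × Int) _n =>
          (s.1.insert s.2.2 0, s.2.1.insert s.2.2 0, s.2.2 + 1))
        (cz.1, cz.2, 0)).2.1)) (PySem.Dict.empty, PySem.Dict.empty))).2.getD i 0 then (ge.1 ++ [1], ge.2 ++ [0])
      else ge)
    ([], [])

-- let-free expansion of port B (definitionally equal; used only by the proofs)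
def pvBexp (x : List String) : List Int × List Int :=
  (PySem.List.pyRange 0 (PySem.List.maxD (x.map (fun e => PySem.Str.len e)) (fun v => v) 0) 1).foldl
    (fun ge j =>
      if ((x.filterMap (fun e => if PySem.Str.len e > j then PySem.Str.pyGet? e j else none)).count '1' : Int) > ((x.filterMap (fun e => if PySem.Str.len e > j then PySem.Str.pyGet? e j else none)).count '0' : Int) then (ge.1 ++ [1], ge.2 ++ [0])
      else if ((x.filterMap (fun e => if PySem.Str.len e > j then PySem.Str.pyGet? e j else none)).count '1' : Int) < ((x.filterMap (fun e => if PySem.Str.len e > j then PySem.Str.pyGet? e j else none)).count '0' : Int) then (ge.1 ++ [0], ge.2 ++ [1])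
      else ge)
    ([], [])

theorem pvAexp_eq (x : List String) : pvAexp x = pvCanon x := by
  unfold pvAexp
  rw [show ((PySem.Dict.empty : PySem.Dict Int Int), (PySem.Dict.empty : PySem.Dict Int Int)) =
    (pvZd 0, pvZd 0) from rfl]
  rw [pvLoop1 x 0]
  rw [show x.foldl (fun m e => max m e.toList.length) 0 = pvMx x from rfl]
  have hyp : ∀ e ∈ x, ∀ i : Int, 0 ≤ i → i < e.toList.length →
      (pvZd (pvMx x)).contains i = true ∧ (pvZd (pvMx x)).contains i = true := by
    intro e he i hi1 hi2
    have hle : (e.toList.length : Int) ≤ (pvMx x : Int) := by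
      exact_mod_cast pvLen_le_pvMx x e he
    have hct : (pvZd (pvMx x)).contains i = true := by
      rw [pvZd_contains, decide_eq_true_eq]
      exact ⟨hi1, by omega⟩
    exact ⟨hct, hct⟩
  obtain ⟨K1, K2, G1, G2⟩ := pvLoop2 x (pvZd (pvMx x)) (pvZd (pvMx x)) hyp
  have hsize : (x.foldl (fun (cz : PySem.Dict Int Int × PySem.Dict Int Int) elem =>
      ((elem.toList.foldl
        (fun (s : PySem.Dict Int Int × PySem.Dict Int Int × Int) n =>
          (if n = '1' then s.1.modify s.2.2 0 (· + 1) else s.1,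
           if n = '0' then s.2.1.modify s.2.2 0 (· + 1) else s.2.1,
           s.2.2 + 1))
        (cz.1, cz.2, 0)).1,
       (elem.toList.foldl
        (fun (s : PySem.Dict Int Int × PySem.Dict Int Int × Int) n =>
          (if n = '1' then s.1.modify s.2.2 0 (· + 1) else s.1,
           if n = '0' then s.2.1.modify s.2.2 0 (· + 1) else s.2.1,
           s.2.2 + 1))
        (cz.1, cz.2, 0)).2.1)) (pvZd (pvMx x), pvZd (pvMx x))).1.size = pvMx x := by
    rw [pvSizeKeys, K1, pvZd_keys, List.length_map, List.length_range]
  rw [hsize]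
  unfold pvCanon
  refine PySem.List.foldl_congr_mem _ _ _ _ ?_
  intro acc i hi
  rw [PySem.List.mem_pyRange_one] at hi
  dsimp only
  rw [G1 i, G2 i, pvZd_getD, zero_add, zero_add]
  rcases lt_trichotomy ((x.map (fun e => pvHit e.toList 0 i '1')).sum) ((x.map (fun e => pvHit e.toList 0 i '0')).sum) with h | h | h
  · have hno : ¬((x.map (fun e => pvHit e.toList 0 i '1')).sum > (x.map (fun e => pvHit e.toList 0 i '0')).sum) := by omega
    rw [if_pos h, if_neg hno, if_pos h]
  · have hno : ¬((x.map (fun e => pvHit e.toList 0 i '1')).sum < (x.map (fun e => pvHit e.toList 0 i '0')).sum) := by omega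
    have hno' : ¬((x.map (fun e => pvHit e.toList 0 i '1')).sum > (x.map (fun e => pvHit e.toList 0 i '0')).sum) := by omega
    rw [if_neg hno, if_neg hno', if_neg hno', if_neg hno]
  · have hno : ¬((x.map (fun e => pvHit e.toList 0 i '1')).sum < (x.map (fun e => pvHit e.toList 0 i '0')).sum) := by omega
    have hgt : ((x.map (fun e => pvHit e.toList 0 i '1')).sum > (x.map (fun e => pvHit e.toList 0 i '0')).sum) := by omega
    rw [if_neg hno, if_pos hgt, if_pos hgt]

theorem pvBexp_eq (x : List String) : pvBexp x = pvCanon x := by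
  unfold pvBexp pvCanon
  rw [pvMaxD_eq]
  refine PySem.List.foldl_congr_mem _ _ _ _ ?_
  intro acc j hj
  rw [PySem.List.mem_pyRange_one] at hj
  have h1 := pvCol_count x j hj.1 '1'
  have h0 := pvCol_count x j hj.1 '0'
  rw [h1, h0]

-- ===== VERDICT (by name: the statement is the Claim_ definition above) =====
theorem obtain_gamma_epsilon_binary_spec : Claim_equal_obtain_gamma_epsilon_binary := by
  intro x _hdom
  unfold Spec_obtain_gamma_epsilon_binary
  have hA : obtain_gamma_epsilon_binary x = pvAexp x := rfl
  have hB : obtain_gamma_epsilon_binary_alt x = pvBexp x := rfl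
  rw [hA, hB, pvAexp_eq, pvBexp_eq]
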